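-- pv_equiv track=rewrite | github.com/InetIntel/ioda-upstream-delay | Analysis/bundleAnalysis.py | compute_as_bundle_prefix_as_paths
-- ===== SOURCE A (Python) =====
-- def compute_as_bundle_prefix_as_paths(as_prefix_mapping, prefix_path_mapping):
--
--     as_bundle_prefix_as_paths = {}
--
--     for as_number, prefixes in as_prefix_mapping.items():
--         as_bundle_map = {}
--
--         for prefix in prefixes:
--             as_path = prefix_path_mapping.get(prefix, [])
--             as_path_str = ' '.join(as_path)
--             bundle_id = as_path_str
--             if bundle_id in as_bundle_map:
--                 if prefix not in as_bundle_map[bundle_id]: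
--                     as_bundle_map[bundle_id].append(prefix)
--             else:
--                 as_bundle_map[bundle_id] = [prefix]
--
--         as_bundle_prefix_as_paths[as_number] = as_bundle_map
--
--     return as_bundle_prefix_as_paths
-- ===== SOURCE B (Python) =====
-- def compute_as_bundle_prefix_as_paths(as_prefix_mapping, prefix_path_mapping):
--     result = {}
--     for as_number, prefixes in as_prefix_mapping.items():
--         # a duplicate prefix always yields the same bundle key, so deduplicating
--         # the prefix list up front subsumes A's per-bundle membership checks
--         uniq = list(dict.fromkeys(prefixes))
--         keyed = [(' '.join(prefix_path_mapping.get(p, [])), p) for p in uniq]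
--         result[as_number] = {k: [p for k2, p in keyed if k2 == k]
--                              for k in dict.fromkeys(k for k, _ in keyed)}
--     return result
-- ===== Notes on version B (the rewrite author's own statement) =====
-- stated objective: alternative
-- what changed: Instead of A's single stateful pass that builds each bundle map with a membership check and conditional append per prefix, B deduplicates the prefix list up front (valid since the bundle key is a pure function of the prefix), then forms each AS's bundle dict by a nested rescan: one comprehension over the distinct keys, each re-scanning the keyed list to collect its prefixes.
import Mathlib
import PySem

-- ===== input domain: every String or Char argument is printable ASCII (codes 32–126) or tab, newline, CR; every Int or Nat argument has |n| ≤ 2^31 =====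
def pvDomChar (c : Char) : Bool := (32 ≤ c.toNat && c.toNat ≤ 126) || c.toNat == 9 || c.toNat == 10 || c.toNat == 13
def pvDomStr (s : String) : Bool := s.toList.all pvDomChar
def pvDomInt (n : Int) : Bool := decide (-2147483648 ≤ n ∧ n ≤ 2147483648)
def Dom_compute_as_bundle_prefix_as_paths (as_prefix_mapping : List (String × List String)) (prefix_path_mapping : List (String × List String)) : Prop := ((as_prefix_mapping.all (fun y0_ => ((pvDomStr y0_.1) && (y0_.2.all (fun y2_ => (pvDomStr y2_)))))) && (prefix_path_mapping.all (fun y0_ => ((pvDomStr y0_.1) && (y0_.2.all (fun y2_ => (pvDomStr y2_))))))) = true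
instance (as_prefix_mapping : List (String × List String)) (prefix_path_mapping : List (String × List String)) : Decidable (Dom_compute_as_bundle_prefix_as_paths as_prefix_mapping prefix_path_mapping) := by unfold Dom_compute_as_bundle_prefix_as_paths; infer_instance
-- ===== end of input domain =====

-- B deduplicates each AS's prefix list up front (the bundle key is a pure function of
-- the prefix) and then builds the bundle dict by rescanning the keyed list once per
-- distinct key, instead of A's single stateful pass with per-bundle membership checks.


-- ===== PORT A =====
def compute_as_bundle_prefix_as_paths (as_prefix_mapping : List (String × List String)) (prefix_path_mapping : List (String × List String)) : List (String × List (String × List String)) :=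
  let ppd : PySem.Dict String (List String) := PySem.Dict.ofList prefix_path_mapping
  let res : PySem.Dict String (PySem.Dict String (List String)) :=
    (PySem.Dict.ofList as_prefix_mapping).items.foldl (fun acc ap =>
      let as_bundle_map : PySem.Dict String (List String) :=
        ap.2.foldl (fun bm pfx =>
          let as_path := ppd.getD pfx []
          let as_path_str := PySem.Str.join " " as_path
          let bundle_id := as_path_str
          if bm.contains bundle_id then
            if (bm.getD bundle_id []).contains pfx then bm
            else bm.insert bundle_id (bm.getD bundle_id [] ++ [pfx])
          else bm.insert bundle_id [pfx]) PySem.Dict.empty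
      acc.insert ap.1 as_bundle_map) PySem.Dict.empty
  res.items.map (fun q => (q.1, q.2.items))

-- ===== PORT B =====
def compute_as_bundle_prefix_as_paths_alt (as_prefix_mapping : List (String × List String)) (prefix_path_mapping : List (String × List String)) : List (String × List (String × List String)) :=
  let ppd : PySem.Dict String (List String) := PySem.Dict.ofList prefix_path_mapping
  let res : PySem.Dict String (List (String × List String)) :=
    (PySem.Dict.ofList as_prefix_mapping).items.foldl (fun acc ap =>
      let uniq := PySem.List.dedup ap.2
      let keyed := uniq.map (fun p => (PySem.Str.join " " (ppd.getD p []), p))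
      -- dict comprehension over the distinct keys (unique, first-seen order) = map over them
      acc.insert ap.1
        ((PySem.List.dedup (keyed.map (fun q => q.1))).map
          (fun k => (k, keyed.filterMap (fun q => if q.1 == k then some q.2 else none))))) PySem.Dict.empty
  res.items

-- ===== PRECONDITION & SPEC =====
def Spec_compute_as_bundle_prefix_as_paths (as_prefix_mapping : List (String × List String)) (prefix_path_mapping : List (String × List String)) (out : List (String × List (String × List String))) : Prop := out = compute_as_bundle_prefix_as_paths_alt as_prefix_mapping prefix_path_mapping
instance (as_prefix_mapping : List (String × List String)) (prefix_path_mapping : List (String × List String)) (out : List (String × List (String × List String))) : Decidable (Spec_compute_as_bundle_prefix_as_paths as_prefix_mapping prefix_path_mapping out) := by unfold Spec_compute_as_bundle_prefix_as_paths; infer_instance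

-- ===== CLAIM (what is proved, stated in full; the proofs are below) =====
def Claim_equal_compute_as_bundle_prefix_as_paths : Prop := ∀ (as_prefix_mapping : List (String × List String)) (prefix_path_mapping : List (String × List String)), Dom_compute_as_bundle_prefix_as_paths as_prefix_mapping prefix_path_mapping → Spec_compute_as_bundle_prefix_as_paths as_prefix_mapping prefix_path_mapping (compute_as_bundle_prefix_as_paths as_prefix_mapping prefix_path_mapping)

-- ===== LEMMAS AND PROOFS =====

-- map a function over a dict's values (proof-side gadget relating the two outer folds)
def pvMapVal {κ ν ν' : Type} (g : ν → ν') (d : PySem.Dict κ ν) : PySem.Dict κ ν' :=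
  ⟨d.items.map (fun q => (q.1, g q.2))⟩

theorem contains_pvMapVal {κ ν ν' : Type} [BEq κ] (g : ν → ν') (d : PySem.Dict κ ν) (k : κ) :
    (pvMapVal g d).contains k = d.contains k := by
  simp [pvMapVal, PySem.Dict.contains, List.any_map, Function.comp_def]

theorem insert_pvMapVal {κ ν ν' : Type} [BEq κ] (g : ν → ν') (d : PySem.Dict κ ν) (k : κ) (v : ν) :
    pvMapVal g (d.insert k v) = (pvMapVal g d).insert k (g v) := by
  simp only [PySem.Dict.insert, contains_pvMapVal]
  by_cases h : d.contains k = true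
  · simp only [h, if_true, pvMapVal, List.map_map]
    congr 1
    apply List.map_congr_left
    intro p _
    by_cases hk : (p.1 == k) = true <;> simp [hk]
  · simp [h, pvMapVal]

theorem dedup_snoc {α : Type} [BEq α] [LawfulBEq α] (v : List α) (p : α) :
    PySem.List.dedup (v ++ [p]) =
      if p ∈ v then PySem.List.dedup v else PySem.List.dedup v ++ [p] := by
  have h1 : PySem.List.dedup (v ++ [p]) = PySem.Set.add (PySem.List.dedup v) p := by
    simp [PySem.List.dedup, PySem.Set.ofList, List.foldl_append, PySem.Set.add]
  rw [h1]
  simp only [PySem.Set.add]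
  by_cases hp : p ∈ v <;> simp [PySem.Set.contains, hp]

-- first-match lookup in a dict built as a map over a key list
theorem get?_map_pair {ν : Type} (ks : List String) (f : String → ν) (k0 : String)
    (h : k0 ∈ ks) :
    (PySem.Dict.mk (ks.map (fun k => (k, f k)))).get? k0 = some (f k0) := by
  induction ks with
  | nil => cases h
  | cons a t ih =>
    rw [List.map_cons, PySem.Dict.get?_mk_cons]
    by_cases hak : (a == k0) = true
    · have : a = k0 := by simpa using hak
      simp [this]
    · have hne : a ≠ k0 := by simpa using hak
      simp only [hak, Bool.false_eq_true, if_false]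
      exact ih (by cases h with | head => exact absurd rfl hne | tail _ h' => exact h')

theorem contains_map_pair {ν : Type} (ks : List String) (f : String → ν) (k0 : String) :
    (PySem.Dict.mk (ks.map (fun k => (k, f k)))).contains k0 = decide (k0 ∈ ks) := by
  induction ks with
  | nil => simp [PySem.Dict.contains]
  | cons a t ih =>
    simp only [List.map_cons, PySem.Dict.contains, List.any_cons] at *
    rw [ih]
    by_cases h : a = k0
    · subst h; simp
    · have h1 : (a == k0) = false := by simpa using h
      have h2 : ¬ k0 = a := fun hh => h hh.symm
      simp [h1, List.mem_cons, h2]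

-- A's inner loop body, named for the proofs (definitionally the lambda in port A)
def pvStepA (ppd : PySem.Dict String (List String))
    (bm : PySem.Dict String (List String)) (pfx : String) : PySem.Dict String (List String) :=
  if bm.contains (PySem.Str.join " " (ppd.getD pfx [])) then
    if (bm.getD (PySem.Str.join " " (ppd.getD pfx [])) []).contains pfx then bm
    else bm.insert (PySem.Str.join " " (ppd.getD pfx []))
           (bm.getD (PySem.Str.join " " (ppd.getD pfx [])) [] ++ [pfx])
  else bm.insert (PySem.Str.join " " (ppd.getD pfx [])) [pfx]

-- the closed form of A's inner state after processing a (deduplicated) prefix list u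
def pvBundleOf (ppd : PySem.Dict String (List String)) (u : List String) :
    PySem.Dict String (List String) :=
  PySem.Dict.mk
    ((PySem.List.dedup (u.map (fun p => PySem.Str.join " " (ppd.getD p [])))).map
      (fun k => (k, u.filter (fun p => PySem.Str.join " " (ppd.getD p []) == k))))

theorem contains_pvBundleOf (ppd : PySem.Dict String (List String)) (u : List String)
    (k0 : String) :
    (pvBundleOf ppd u).contains k0
      = decide (k0 ∈ u.map (fun p => PySem.Str.join " " (ppd.getD p []))) := by
  rw [pvBundleOf, contains_map_pair]
  simp

theorem getD_pvBundleOf (ppd : PySem.Dict String (List String)) (u : List String)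
    (k0 : String) (h : k0 ∈ u.map (fun p => PySem.Str.join " " (ppd.getD p []))) :
    (pvBundleOf ppd u).getD k0 []
      = u.filter (fun p => PySem.Str.join " " (ppd.getD p []) == k0) := by
  rw [pvBundleOf, PySem.Dict.getD_eq_get?_getD,
    get?_map_pair _ _ _ ((PySem.List.mem_dedup _ _).mpr h)]
  rfl

-- one step of A on the closed form: a duplicate prefix is skipped
theorem pvStepA_dup (ppd : PySem.Dict String (List String)) (u : List String) (p : String)
    (hpu : p ∈ u) :
    pvStepA ppd (pvBundleOf ppd u) p = pvBundleOf ppd u := by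
  have hkin : PySem.Str.join " " (ppd.getD p [])
      ∈ u.map (fun q => PySem.Str.join " " (ppd.getD q [])) := List.mem_map_of_mem hpu
  rw [pvStepA, contains_pvBundleOf, getD_pvBundleOf ppd u _ hkin]
  simp [hkin]
  intro hcon
  exact absurd hpu hcon

-- one step of A on the closed form: a fresh prefix extends its (possibly new) bundle
theorem pvStepA_fresh (ppd : PySem.Dict String (List String)) (u : List String) (p : String)
    (hpu : p ∉ u) :
    pvStepA ppd (pvBundleOf ppd u) p = pvBundleOf ppd (u ++ [p]) := by
  by_cases hkin : PySem.Str.join " " (ppd.getD p [])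
      ∈ u.map (fun q => PySem.Str.join " " (ppd.getD q []))
  · -- existing bundle key: A appends p to its bundle; the key list is unchanged
    have hmem : (u.filter (fun q => PySem.Str.join " " (ppd.getD q [])
        == PySem.Str.join " " (ppd.getD p []))).contains p = false := by
      simp only [List.contains_eq_mem, decide_eq_false_iff_not]
      intro hmf; exact hpu (List.mem_filter.mp hmf).1
    have hc : (pvBundleOf ppd u).contains (PySem.Str.join " " (ppd.getD p [])) = true := by
      rw [contains_pvBundleOf]; simpa using hkin
    rw [pvStepA, getD_pvBundleOf ppd u _ hkin]
    simp only [hc, hmem, Bool.false_eq_true, if_false, if_true]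
    apply PySem.Dict.ext
    rw [PySem.Dict.items_insert_of_contains _ _ hc]
    show ((PySem.List.dedup (u.map _)).map _).map _ = _
    have hks : PySem.List.dedup ((u ++ [p]).map (fun q => PySem.Str.join " " (ppd.getD q [])))
        = PySem.List.dedup (u.map (fun q => PySem.Str.join " " (ppd.getD q []))) := by
      rw [List.map_append, List.map_singleton, dedup_snoc, if_pos hkin]
    rw [pvBundleOf, hks, List.map_map]
    apply List.map_congr_left
    intro k _
    by_cases hkp : (k == PySem.Str.join " " (ppd.getD p [])) = true
    · have hkeq : k = PySem.Str.join " " (ppd.getD p []) := by simpa using hkp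
      simp only [Function.comp_apply, hkp, if_true]
      subst hkeq
      simp [List.filter_append]
    · have hkne : k ≠ PySem.Str.join " " (ppd.getD p []) := by simpa using hkp
      simp only [Function.comp_apply, hkp, Bool.false_eq_true, if_false]
      simp [List.filter_append, beq_iff_eq, Ne.symm hkne]
  · -- brand-new bundle key: A appends a singleton entry at the end
    have hc : (pvBundleOf ppd u).contains (PySem.Str.join " " (ppd.getD p [])) = false := by
      rw [contains_pvBundleOf]; simpa using hkin
    rw [pvStepA]
    simp only [hc, Bool.false_eq_true, if_false]
    apply PySem.Dict.ext
    rw [PySem.Dict.items_insert_of_not_contains _ _ hc]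
    have hks : PySem.List.dedup ((u ++ [p]).map (fun q => PySem.Str.join " " (ppd.getD q [])))
        = PySem.List.dedup (u.map (fun q => PySem.Str.join " " (ppd.getD q [])))
            ++ [PySem.Str.join " " (ppd.getD p [])] := by
      rw [List.map_append, List.map_singleton, dedup_snoc, if_neg hkin]
    rw [pvBundleOf, pvBundleOf, hks, List.map_append, List.map_singleton]
    congr 1
    · apply List.map_congr_left
      intro k hkmem
      have hkne : PySem.Str.join " " (ppd.getD p []) ≠ k := by
        intro h
        rw [PySem.List.mem_dedup] at hkmem
        exact hkin (h ▸ hkmem)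
      simp [List.filter_append, beq_iff_eq, hkne]
    · have hnil : u.filter (fun q => PySem.Str.join " " (ppd.getD q [])
          == PySem.Str.join " " (ppd.getD p [])) = [] := by
        rw [List.filter_eq_nil_iff]
        intro q hq hkq
        exact hkin (List.mem_map.mpr ⟨q, hq, by simpa using hkq⟩)
      simp [List.filter_append, hnil]

-- A's inner bundle-building fold, characterised in closed form
theorem inner_fold_spec (ppd : PySem.Dict String (List String)) (prefixes : List String) :
    prefixes.foldl (pvStepA ppd) PySem.Dict.empty
      = pvBundleOf ppd (PySem.List.dedup prefixes) := by
  induction prefixes using List.reverseRecOn with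
  | nil => rfl
  | append_singleton done p ih =>
    rw [List.foldl_append, List.foldl_cons, List.foldl_nil, ih]
    by_cases hpd : p ∈ done
    · rw [pvStepA_dup ppd _ p (by simpa [PySem.List.mem_dedup] using hpd),
        dedup_snoc, if_pos hpd]
    · rw [pvStepA_fresh ppd _ p (by simpa [PySem.List.mem_dedup] using hpd),
        dedup_snoc, if_neg hpd]

theorem filterMap_if_eq_filter {α : Type} (p : α → Bool) (l : List α) :
    l.filterMap (fun x => if p x then some x else none) = l.filter p := by
  induction l with
  | nil => rfl
  | cons a t ih =>
    by_cases h : p a = true <;> simp [h, ih]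

-- B's inner comprehension value is exactly the items of the closed form
theorem inner_alt_eq (ppd : PySem.Dict String (List String)) (prefixes : List String) :
    ((PySem.List.dedup (((PySem.List.dedup prefixes).map
        (fun p => (PySem.Str.join " " (ppd.getD p []), p))).map (fun q => q.1))).map
      (fun k => (k, ((PySem.List.dedup prefixes).map
        (fun p => (PySem.Str.join " " (ppd.getD p []), p))).filterMap
          (fun q => if q.1 == k then some q.2 else none))))
    = (pvBundleOf ppd (PySem.List.dedup prefixes)).items := by
  rw [pvBundleOf, List.map_map]
  show (PySem.List.dedup ((PySem.List.dedup prefixes).map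
      (fun p => PySem.Str.join " " (ppd.getD p [])))).map _ = _
  apply List.map_congr_left
  intro k _
  congr 1
  rw [List.filterMap_map]
  exact filterMap_if_eq_filter
    (fun p => PySem.Str.join " " (ppd.getD p []) == k) (PySem.List.dedup prefixes)

-- ===== VERDICT (by name: the statement is the Claim_ definition above) =====
theorem compute_as_bundle_prefix_as_paths_spec : Claim_equal_compute_as_bundle_prefix_as_paths := by
  intro apm ppm _
  show compute_as_bundle_prefix_as_paths apm ppm = compute_as_bundle_prefix_as_paths_alt apm ppm
  simp only [compute_as_bundle_prefix_as_paths, compute_as_bundle_prefix_as_paths_alt]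
  generalize PySem.Dict.ofList ppm = ppd
  -- relate the outer folds: B's accumulator is the items-image of A's
  suffices h : ∀ (l : List (String × List String)) (accA : PySem.Dict String (PySem.Dict String (List String))),
      (l.foldl (fun acc ap =>
        acc.insert ap.1
          ((PySem.List.dedup (((PySem.List.dedup ap.2).map
              (fun p => (PySem.Str.join " " (ppd.getD p []), p))).map (fun q => q.1))).map
            (fun k => (k, ((PySem.List.dedup ap.2).map
              (fun p => (PySem.Str.join " " (ppd.getD p []), p))).filterMap
                (fun q => if q.1 == k then some q.2 else none)))))
        (pvMapVal PySem.Dict.items accA))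
      = pvMapVal PySem.Dict.items (l.foldl (fun acc ap =>
          acc.insert ap.1 (ap.2.foldl (pvStepA ppd) PySem.Dict.empty)) accA) by
    have hfin := h (PySem.Dict.ofList apm).items PySem.Dict.empty
    have he : pvMapVal (κ := String) PySem.Dict.items
        (PySem.Dict.empty (ν := PySem.Dict String (List String))) = PySem.Dict.empty := rfl
    rw [he] at hfin
    exact congrArg PySem.Dict.items hfin.symm
  intro l
  induction l with
  | nil => intro accA; rfl
  | cons ap l ih =>
    intro accA
    simp only [List.foldl_cons]
    rw [inner_alt_eq ppd ap.2, ← inner_fold_spec ppd ap.2,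
      ← insert_pvMapVal (g := PySem.Dict.items)]
    exact ih _
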